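-- pv_equiv track=rewrite | github.com/Dom4489/Instagram-Unfollow-Checker | GetUnfollowers.py | findRemoved
-- ===== SOURCE A (Python) =====
-- def findRemoved(saved, followers):
--     saved.sort()
--     followers.sort()
--     removed = []
--     for i in range(len(saved)):
--         try:
--             followers.index(saved[i])
--         except ValueError:
--             removed += [saved[i]]
--     return removed
-- ===== SOURCE B (Python) =====
-- def findRemoved(saved, followers):
--     saved.sort()
--     followers.sort()
--     removed = []
--     j = 0
--     n = len(followers)
--     for s in saved:
--         while j < n and followers[j] < s:
--             j += 1
--         if not (j < n and followers[j] == s):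
--             removed.append(s)
--     return removed
-- ===== Notes on version B (the rewrite author's own statement) =====
-- stated objective: faster
-- what changed: Replaces the per-element linear followers.index scan (inside try/except) with a single two-pointer merge sweep over the two sorted lists, so each follower is examined once in total.
import Mathlib
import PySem

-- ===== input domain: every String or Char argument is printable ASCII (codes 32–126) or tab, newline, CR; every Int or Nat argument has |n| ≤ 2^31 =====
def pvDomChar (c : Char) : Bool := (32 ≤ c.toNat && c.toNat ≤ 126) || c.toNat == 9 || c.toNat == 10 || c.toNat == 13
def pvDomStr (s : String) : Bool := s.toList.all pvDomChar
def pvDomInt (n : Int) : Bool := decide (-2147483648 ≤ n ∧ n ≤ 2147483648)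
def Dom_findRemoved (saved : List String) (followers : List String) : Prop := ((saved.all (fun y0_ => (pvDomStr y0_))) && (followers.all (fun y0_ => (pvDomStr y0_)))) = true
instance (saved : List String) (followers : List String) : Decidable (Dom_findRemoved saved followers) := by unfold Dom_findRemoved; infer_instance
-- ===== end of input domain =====

-- B replaces A's per-element linear followers.index scan with a single two-pointer merge
-- sweep over the two sorted lists (objective: faster). Both A and B sort the two argument
-- lists in place; the equivalence proved here is about the RETURN value (B performs the
-- same in-place sorts as A).


-- ===== PORT A =====
-- A: sort both lists, then for each saved[i] look it up with followers.index inside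
-- try/except, appending saved[i] to removed on ValueError (i.e. when index? = none).
def findRemoved (saved : List String) (followers : List String) : List String :=
  let s := PySem.List.sorted saved (fun x => x) false
  let f := PySem.List.sorted followers (fun x => x) false
  (PySem.List.pyRange 0 (PySem.List.len s) 1).foldl
    (fun removed i =>
      match PySem.List.index? f (PySem.List.pyGetD s i "") with
      | some _ => removed
      | none => removed ++ [PySem.List.pyGetD s i ""]) []

-- ===== PORT B =====
-- B's inner while loop 'advance j while followers[j] < s' = dropWhile on the remaining
-- followers suffix; 'j < n and followers[j] == s' = head? of that suffix equals s.
def mergeMissing : List String → List String → List String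
  | [], _ => []
  | x :: rest, fs =>
    let fs' := fs.dropWhile (fun f => decide (f < x))
    if fs'.head? = some x then mergeMissing rest fs'
    else x :: mergeMissing rest fs'

def findRemoved_alt (saved : List String) (followers : List String) : List String :=
  let s := PySem.List.sorted saved (fun x => x) false
  let f := PySem.List.sorted followers (fun x => x) false
  mergeMissing s f

-- ===== PRECONDITION & SPEC =====
def Spec_findRemoved (saved : List String) (followers : List String) (out : List String) : Prop := out = findRemoved_alt saved followers
instance (saved : List String) (followers : List String) (out : List String) : Decidable (Spec_findRemoved saved followers out) := by unfold Spec_findRemoved; infer_instance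

-- ===== CLAIM (what is proved, stated in full; the proofs are below) =====
def Claim_equal_findRemoved : Prop := ∀ (saved : List String) (followers : List String), Dom_findRemoved saved followers → Spec_findRemoved saved followers (findRemoved saved followers)

-- ===== LEMMAS AND PROOFS =====

-- A's foldl over range(len(s)) is the filter of s by non-membership in f.
theorem findRemoved_eq_filter (saved followers : List String) :
    findRemoved saved followers =
      (PySem.List.sorted saved (fun x => x) false).filter
        (fun x => decide (x ∉ PySem.List.sorted followers (fun x => x) false)) := by
  unfold findRemoved
  rw [PySem.List.foldl_pyRange_zero_pyGetD
    (PySem.List.sorted saved (fun x => x) false) ""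
    (fun removed x =>
      match PySem.List.index? (PySem.List.sorted followers (fun x => x) false) x with
      | some _ => removed
      | none => removed ++ [x]) []]
  rw [PySem.List.foldl_congr_mem (PySem.List.sorted saved (fun x => x) false)
    _ (fun acc x =>
        if (x ∉ PySem.List.sorted followers (fun x => x) false) then acc ++ [x] else acc) []
    (by
      intro acc x _
      rcases h : PySem.List.index? (PySem.List.sorted followers (fun x => x) false) x with _ | k
      · rw [PySem.List.index?_eq_none_iff] at h
        simp only [if_pos h]
      · have hx : x ∈ PySem.List.sorted followers (fun x => x) false := by
          rw [← PySem.List.index?_isSome_iff, h]; rfl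
        simp only [if_neg (not_not_intro hx)])]
  rw [PySem.List.foldl_append_ite_eq_filter, List.nil_append]

-- membership in a list is unchanged by dropping a prefix of elements smaller than x,
-- for any element ≥ that bound
theorem mem_dropWhile_lt_iff (x r : String) (hxr : x ≤ r) (fs : List String) :
    r ∈ fs ↔ r ∈ fs.dropWhile (fun f => decide (f < x)) := by
  constructor
  · intro h
    rw [← List.takeWhile_append_dropWhile (p := fun f => decide (f < x)) (l := fs),
        List.mem_append] at h
    rcases h with h | h
    · have hrx : r < x := of_decide_eq_true (List.mem_takeWhile_imp (p := fun f => decide (f < x)) h)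
      exact absurd (lt_of_lt_of_le hrx hxr) (lt_irrefl r)
    · exact h
  · intro h
    exact (List.dropWhile_sublist _).subset h

-- on a ≤-sorted list, x is a member iff it is the head of the dropWhile-suffix
theorem head_dropWhile_lt (x : String) (fs : List String)
    (hs : fs.Pairwise (fun a b => a ≤ b)) :
    ((fs.dropWhile (fun f => decide (f < x))).head? = some x) ↔ x ∈ fs := by
  rw [mem_dropWhile_lt_iff x x le_rfl fs]
  have hs' : (fs.dropWhile (fun f => decide (f < x))).Pairwise (fun a b => a ≤ b) :=
    hs.sublist (List.dropWhile_sublist _)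
  have hnot := List.head?_dropWhile_not (fun f => decide (f < x)) fs
  rcases hd : fs.dropWhile (fun f => decide (f < x)) with _ | ⟨f, t⟩
  · simp
  · rw [hd] at hnot hs'
    have hnot' : decide (f < x) = false := hnot
    have hf : ¬ f < x := of_decide_eq_false hnot'
    constructor
    · intro h
      have hfx : f = x := by simpa using h
      rw [← hfx]; exact List.mem_cons_self
    · intro h
      rcases List.mem_cons.mp h with h | h
      · simp [h]
      · have hfle : f ≤ x := (List.pairwise_cons.mp hs').1 x h
        have : f = x := le_antisymm hfle (not_lt.mp hf)
        simp [this]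

-- the merge sweep computes the filter, on two ≤-sorted lists
theorem mergeMissing_eq_filter (xs fs : List String)
    (hxs : xs.Pairwise (fun a b => a ≤ b)) (hfs : fs.Pairwise (fun a b => a ≤ b)) :
    mergeMissing xs fs = xs.filter (fun x => decide (x ∉ fs)) := by
  induction xs generalizing fs with
  | nil => simp [mergeMissing]
  | cons x rest ih =>
    have hx_le : ∀ r ∈ rest, x ≤ r := (List.pairwise_cons.mp hxs).1
    have hrest : rest.Pairwise (fun a b => a ≤ b) := (List.pairwise_cons.mp hxs).2
    have hfs' : (fs.dropWhile (fun f => decide (f < x))).Pairwise (fun a b => a ≤ b) :=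
      hfs.sublist (List.dropWhile_sublist _)
    have hrec : mergeMissing rest (fs.dropWhile (fun f => decide (f < x)))
        = rest.filter (fun x => decide (x ∉ fs)) := by
      rw [ih _ hrest hfs']
      apply List.filter_congr
      intro r hr
      exact decide_eq_decide.mpr
        (not_congr (mem_dropWhile_lt_iff x r (hx_le r hr) fs).symm)
    by_cases hx : x ∈ fs
    · have hhd : (fs.dropWhile (fun f => decide (f < x))).head? = some x :=
        (head_dropWhile_lt x fs hfs).mpr hx
      have hp : decide (x ∉ fs) = false := decide_eq_false (not_not_intro hx)
      simp only [mergeMissing, if_pos hhd, hrec]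
      rw [List.filter_cons, hp]
      simp
    · have hhd : ¬ ((fs.dropWhile (fun f => decide (f < x))).head? = some x) := by
        rw [head_dropWhile_lt x fs hfs]; exact hx
      have hp : decide (x ∉ fs) = true := decide_eq_true hx
      simp only [mergeMissing, if_neg hhd, hrec]
      rw [List.filter_cons, hp]
      simp

-- ===== VERDICT (by name: the statement is the Claim_ definition above) =====
theorem findRemoved_spec : Claim_equal_findRemoved := by
  intro saved followers _
  unfold Spec_findRemoved findRemoved_alt
  rw [findRemoved_eq_filter]
  rw [mergeMissing_eq_filter _ _ (PySem.List.sorted_pairwise _ _)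
    (PySem.List.sorted_pairwise _ _)]
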